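-- pv_equiv track=rewrite | github.com/EraCat/hse_cbab2025_hw | src/python/contest_1.py | utf8_size_hist
-- ===== SOURCE A (Python) =====
-- def utf8_size_hist(src):
--     count_1 = 0
--     count_2 = 0
--     count_3 = 0
--     count_4 = 0
--
--     index = -1
--     start_index = -1
--     seq_len = 0
--     expected = 0
--     for byte in src:
--         index += 1
--         if expected == 0:
--             if (byte & 0xF8) == 0xF0:
--                 expected = 3
--                 seq_len = 4
--                 start_index = index
--             elif (byte & 0xF0) == 0xE0:
--                 expected = 2
--                 seq_len = 3
--                 start_index = index
--             elif (byte & 0xE0) == 0xC0: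
--                 expected = 1
--                 seq_len = 2
--                 start_index = index
--             elif (byte & 0x80) == 0x00:
--                 count_1 += 1
--             else:
--                 return (count_1, count_2, count_3, count_4), index
--         else:
--             if (byte & 0xC0) == 0x80:
--                 expected -= 1
--                 if expected == 0:
--                     if seq_len == 4:
--                         count_4 += 1
--                     elif seq_len == 3:
--                         count_3 += 1
--                     elif seq_len == 2:
--                         count_2 += 1
--             else:
--                 return (count_1, count_2, count_3, count_4), start_index
--
--     if expected > 0:
--         return (count_1, count_2, count_3, count_4), start_index
--
--     return (count_1, count_2, count_3, count_4), -1
-- ===== SOURCE B (Python) =====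
-- def utf8_size_hist(src):
--     count_1 = 0
--     count_2 = 0
--     count_3 = 0
--     count_4 = 0
--
--     it = iter(src)
--     index = -1
--     for byte in it:
--         index += 1
--         if (byte & 0xF8) == 0xF0:
--             length = 4
--         elif (byte & 0xF0) == 0xE0:
--             length = 3
--         elif (byte & 0xE0) == 0xC0:
--             length = 2
--         elif (byte & 0x80) == 0x00:
--             count_1 += 1
--             continue
--         else:
--             return (count_1, count_2, count_3, count_4), index
--
--         start = index
--         for _ in range(length - 1):
--             cont = next(it, None)
--             if cont is None or (cont & 0xC0) != 0x80:
--                 return (count_1, count_2, count_3, count_4), start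
--             index += 1
--
--         if length == 4:
--             count_4 += 1
--         elif length == 3:
--             count_3 += 1
--         else:
--             count_2 += 1
--
--     return (count_1, count_2, count_3, count_4), -1
-- ===== Notes on version B (the rewrite author's own statement) =====
-- stated objective: alternative
-- what changed: Replaces A's single flat state machine (expected/seq_len/start_index counters threaded through one loop over all bytes) with an iterator-driven outer loop per sequence plus an inner loop that consumes and validates the continuation bytes of each multibyte lead.
import Mathlib
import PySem

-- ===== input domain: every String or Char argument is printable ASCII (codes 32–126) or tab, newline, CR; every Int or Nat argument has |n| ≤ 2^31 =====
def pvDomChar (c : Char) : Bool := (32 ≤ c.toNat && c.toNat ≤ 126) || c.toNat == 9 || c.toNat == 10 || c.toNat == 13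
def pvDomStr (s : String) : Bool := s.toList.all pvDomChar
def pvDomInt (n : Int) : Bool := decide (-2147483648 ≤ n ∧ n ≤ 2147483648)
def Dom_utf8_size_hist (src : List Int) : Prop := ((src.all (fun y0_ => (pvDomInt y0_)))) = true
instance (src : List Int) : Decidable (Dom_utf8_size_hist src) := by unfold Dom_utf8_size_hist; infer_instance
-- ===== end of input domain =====

-- B replaces A's single flat state machine (expected/seq_len/start_index counters threaded
-- through one loop) by an iterator-driven outer loop with an inner loop that consumes the
-- continuation bytes of each multibyte sequence; objective: alternative decomposition.

-- ===== PORT A =====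
-- literal transliteration of A's single-loop state machine
def utf8_loopA : List Int → Int → Int → Int → Int → Int → Int → Int → Int → (Int × Int × Int × Int) × Int
  | [], c1, c2, c3, c4, _, start, _, expected =>
      if expected > 0 then ((c1, c2, c3, c4), start) else ((c1, c2, c3, c4), -1)
  | byte :: rest, c1, c2, c3, c4, index, start, seqLen, expected =>
      let index := index + 1
      if expected = 0 then
        if PySem.Int.band byte 0xF8 = 0xF0 then utf8_loopA rest c1 c2 c3 c4 index index 4 3
        else if PySem.Int.band byte 0xF0 = 0xE0 then utf8_loopA rest c1 c2 c3 c4 index index 3 2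
        else if PySem.Int.band byte 0xE0 = 0xC0 then utf8_loopA rest c1 c2 c3 c4 index index 2 1
        else if PySem.Int.band byte 0x80 = 0 then utf8_loopA rest (c1 + 1) c2 c3 c4 index start seqLen expected
        else ((c1, c2, c3, c4), index)
      else
        if PySem.Int.band byte 0xC0 = 0x80 then
          let expected := expected - 1
          if expected = 0 then
            if seqLen = 4 then utf8_loopA rest c1 c2 c3 (c4 + 1) index start seqLen expected
            else if seqLen = 3 then utf8_loopA rest c1 c2 (c3 + 1) c4 index start seqLen expected
            else if seqLen = 2 then utf8_loopA rest c1 (c2 + 1) c3 c4 index start seqLen expected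
            else utf8_loopA rest c1 c2 c3 c4 index start seqLen expected
          else utf8_loopA rest c1 c2 c3 c4 index start seqLen expected
        else ((c1, c2, c3, c4), start)

def utf8_size_hist (src : List Int) : (Int × Int × Int × Int) × Int :=
  utf8_loopA src 0 0 0 0 (-1) (-1) 0 0

-- ===== PORT B =====
-- inner loop of B: pull k continuation bytes from the iterator, advancing the index;
-- none = a missing or invalid continuation byte (early return with `start`)
def utf8_cont : List Int → Nat → Int → Option Int
  | _, 0, index => some index
  | [], _ + 1, _ => none
  | c :: rest, k + 1, index =>
      if PySem.Int.band c 0xC0 = 0x80 then utf8_cont rest k (index + 1) else none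

-- outer loop of B; the iterator after a successful inner loop is `rest.drop (len - 1)`
def utf8_loopB : List Int → Int → Int → Int → Int → Int → (Int × Int × Int × Int) × Int
  | [], _, c1, c2, c3, c4 => ((c1, c2, c3, c4), -1)
  | byte :: rest, index, c1, c2, c3, c4 =>
      let index := index + 1
      let len? : Option Nat :=
        if PySem.Int.band byte 0xF8 = 0xF0 then some 4
        else if PySem.Int.band byte 0xF0 = 0xE0 then some 3
        else if PySem.Int.band byte 0xE0 = 0xC0 then some 2
        else none
      match len? with
      | none =>
          if PySem.Int.band byte 0x80 = 0 then utf8_loopB rest index (c1 + 1) c2 c3 c4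
          else ((c1, c2, c3, c4), index)
      | some len =>
          match utf8_cont rest (len - 1) index with
          | none => ((c1, c2, c3, c4), index)
          | some j =>
              if len = 4 then utf8_loopB (rest.drop (len - 1)) j c1 c2 c3 (c4 + 1)
              else if len = 3 then utf8_loopB (rest.drop (len - 1)) j c1 c2 (c3 + 1) c4
              else utf8_loopB (rest.drop (len - 1)) j c1 (c2 + 1) c3 c4
  termination_by xs _ _ _ _ _ => xs.length
  decreasing_by all_goals simp [List.length_drop]

def utf8_size_hist_alt (src : List Int) : (Int × Int × Int × Int) × Int :=
  utf8_loopB src (-1) 0 0 0 0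

-- ===== PRECONDITION & SPEC =====
def Spec_utf8_size_hist (src : List Int) (out : (Int × Int × Int × Int) × Int) : Prop := out = utf8_size_hist_alt src
instance (src : List Int) (out : (Int × Int × Int × Int) × Int) : Decidable (Spec_utf8_size_hist src out) := by unfold Spec_utf8_size_hist; infer_instance

-- ===== CLAIM (what is proved, stated in full; the proofs are below) =====
def Claim_equal_utf8_size_hist : Prop := ∀ (src : List Int), Dom_utf8_size_hist src → Spec_utf8_size_hist src (utf8_size_hist src)

-- ===== LEMMAS AND PROOFS =====

-- A's continuation phase (expected = e+1 > 0) equals B's inner loop `utf8_cont`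
theorem utf8_contA (e : Nat) : ∀ (xs : List Int) (c1 c2 c3 c4 index start seq : Int),
    utf8_loopA xs c1 c2 c3 c4 index start seq ((e : Int) + 1) =
      match utf8_cont xs (e + 1) index with
      | none => ((c1, c2, c3, c4), start)
      | some j =>
          if seq = 4 then utf8_loopA (xs.drop (e + 1)) c1 c2 c3 (c4 + 1) j start seq 0
          else if seq = 3 then utf8_loopA (xs.drop (e + 1)) c1 c2 (c3 + 1) c4 j start seq 0
          else if seq = 2 then utf8_loopA (xs.drop (e + 1)) c1 (c2 + 1) c3 c4 j start seq 0
          else utf8_loopA (xs.drop (e + 1)) c1 c2 c3 c4 j start seq 0 := by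
  induction e with
  | zero =>
      intro xs c1 c2 c3 c4 index start seq
      cases xs with
      | nil => simp [utf8_loopA, utf8_cont]
      | cons b rest =>
          simp only [utf8_loopA, utf8_cont, List.drop_succ_cons, List.drop_zero]
          norm_num
          by_cases hb : PySem.Int.band b 0xC0 = 0x80
          · rw [if_pos hb, if_pos hb]
          · rw [if_neg hb, if_neg hb]
  | succ e ih =>
      intro xs c1 c2 c3 c4 index start seq
      have h0 : ¬ ((e : Int) + 1 + 1 = 0) := by omega
      have h1 : ((e : Int) + 1 + 1) - 1 = (e : Int) + 1 := by ring
      have h2 : ¬ ((e : Int) + 1 + 1 - 1 = 0) := by omega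
      cases xs with
      | nil =>
          have hpos : ((e : Int) + 1 + 1) > 0 := by omega
          simp only [utf8_loopA, utf8_cont]
          push_cast
          rw [if_pos hpos]
      | cons b rest =>
          simp only [utf8_loopA, utf8_cont, List.drop_succ_cons]
          push_cast
          rw [if_neg h0]
          by_cases hb : PySem.Int.band b 0xC0 = 0x80
          · rw [if_pos hb, if_pos hb, if_neg h2, h1, ih]
          · rw [if_neg hb, if_neg hb]

-- main invariant: A's loop with expected = 0 equals B's outer loop (start/seqLen are dead state)
theorem utf8_main : ∀ (n : Nat) (xs : List Int), xs.length ≤ n →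
    ∀ (c1 c2 c3 c4 index start seq : Int),
    utf8_loopA xs c1 c2 c3 c4 index start seq 0 = utf8_loopB xs index c1 c2 c3 c4 := by
  intro n
  induction n with
  | zero =>
      intro xs hlen
      have : xs = [] := by cases xs <;> simp_all
      subst this
      intro c1 c2 c3 c4 index start seq
      simp [utf8_loopA, utf8_loopB]
  | succ n ih =>
      intro xs hlen c1 c2 c3 c4 index start seq
      cases xs with
      | nil => simp [utf8_loopA, utf8_loopB]
      | cons byte rest =>
          have hrest : rest.length ≤ n := by simp at hlen; omega
          have hdrop : ∀ k : Nat, (rest.drop k).length ≤ n := by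
            intro k; simp [List.length_drop]; omega
          by_cases hF8 : PySem.Int.band byte 0xF8 = 0xF0
          · have hA := utf8_contA 2 rest c1 c2 c3 c4 (index + 1) (index + 1) 4
            norm_num at hA
            simp only [utf8_loopA, utf8_loopB, if_pos hF8, hA]
            cases h : utf8_cont rest 3 (index + 1) with
            | none => simp
            | some j => simp [ih _ (hdrop 3)]
          · by_cases hF0 : PySem.Int.band byte 0xF0 = 0xE0
            · have hA := utf8_contA 1 rest c1 c2 c3 c4 (index + 1) (index + 1) 3
              norm_num at hA
              simp only [utf8_loopA, utf8_loopB, if_neg hF8, if_pos hF0, hA]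
              cases h : utf8_cont rest 2 (index + 1) with
              | none => simp
              | some j => simp [ih _ (hdrop 2)]
            · by_cases hE0 : PySem.Int.band byte 0xE0 = 0xC0
              · have hA := utf8_contA 0 rest c1 c2 c3 c4 (index + 1) (index + 1) 2
                norm_num at hA
                simp only [utf8_loopA, utf8_loopB, if_neg hF8, if_neg hF0, if_pos hE0, hA]
                cases h : utf8_cont rest 1 (index + 1) with
                | none => simp
                | some j =>
                    simp [ih rest.tail (by simpa [List.drop_one] using hdrop 1)]
              · by_cases h80 : PySem.Int.band byte 0x80 = 0
                · simp only [utf8_loopA, utf8_loopB, if_neg hF8, if_neg hF0, if_neg hE0,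
                    if_pos h80]
                  exact ih rest hrest _ _ _ _ _ _ _
                · simp [utf8_loopA, utf8_loopB, hF8, hF0, hE0, h80]

-- ===== VERDICT (by name: the statement is the Claim_ definition above) =====
theorem utf8_size_hist_spec : Claim_equal_utf8_size_hist := by
  intro src _
  unfold Spec_utf8_size_hist utf8_size_hist utf8_size_hist_alt
  exact utf8_main src.length src le_rfl 0 0 0 0 (-1) (-1) 0
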